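-- pv_equiv track=rewrite | github.com/msilva1610/ApostasMegasSena | RefinalistaApostas.py | CalculaParImparSomaDez
-- ===== SOURCE A (Python) =====
-- def CalculaParImparSomaDez(dezenas):
--     impares = 0
--     pares = 0
--     SomaDezenas = 0
--     for d in dezenas:
--         if d % 2 != 0:
--             impares += 1
--         else:
--             pares += 1
--         SomaDezenas += d
--     return impares, pares, SomaDezenas
-- ===== SOURCE B (Python) =====
-- def CalculaParImparSomaDez(dezenas):
--     L = list(dezenas)
--
--     def rec(lo, hi):
--         # divide and conquer over L[lo:hi]
--         if hi - lo == 0: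
--             return 0, 0, 0
--         if hi - lo == 1:
--             d = L[lo]
--             r = d % 2          # 1 if odd, 0 if even
--             return r, 1 - r, d
--         mid = (lo + hi) // 2
--         i1, p1, s1 = rec(lo, mid)
--         i2, p2, s2 = rec(mid, hi)
--         return i1 + i2, p1 + p2, s1 + s2
--
--     return rec(0, len(L))
-- ===== Notes on version B (the rewrite author's own statement) =====
-- stated objective: alternative
-- what changed: Replaces A's single left-to-right three-accumulator loop with a divide-and-conquer recursion that splits the index range in halves and combines the three sums, computing the odd count arithmetically via the d % 2 indicator (even count as 1 - r at the leaves) instead of a branch with parallel counters; correct because all three quantities are sums over the list and addition is associative.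
import Mathlib
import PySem

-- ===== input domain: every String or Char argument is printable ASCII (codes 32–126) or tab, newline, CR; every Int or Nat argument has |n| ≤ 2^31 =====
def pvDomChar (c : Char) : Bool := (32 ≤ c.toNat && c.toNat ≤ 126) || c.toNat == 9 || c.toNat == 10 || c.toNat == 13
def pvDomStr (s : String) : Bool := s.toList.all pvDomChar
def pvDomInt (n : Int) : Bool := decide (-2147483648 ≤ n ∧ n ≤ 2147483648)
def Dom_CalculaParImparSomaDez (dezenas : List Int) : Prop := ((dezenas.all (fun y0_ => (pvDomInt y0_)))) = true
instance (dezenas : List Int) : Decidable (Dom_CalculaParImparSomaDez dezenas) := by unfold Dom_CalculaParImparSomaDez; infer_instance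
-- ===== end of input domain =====

-- B replaces A's single three-accumulator loop by a divide-and-conquer recursion over index
-- ranges, with the odd count taken arithmetically from the d % 2 indicator (objective: alternative).

-- ===== PORT A =====
def CalculaParImparSomaDez (dezenas : List Int) : Int × Int × Int :=
  dezenas.foldl
    (fun acc d =>
      let (impares, pares, soma) := acc
      if PySem.Int.mod d 2 ≠ 0 then (impares + 1, pares, soma + d)
      else (impares, pares + 1, soma + d))
    (0, 0, 0)

-- ===== PORT B =====
-- rec(lo, hi) of Source B; L[lo] is always in range on the calls rec makes (lo < hi ≤ len L),
-- so the total pyGetD is exact there.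
def pvRecB (L : List Int) (lo hi : Nat) : Int × Int × Int :=
  if _h0 : hi - lo = 0 then (0, 0, 0)
  else if _h1 : hi - lo = 1 then
    let d := PySem.List.pyGetD L (lo : Int) 0
    let r := PySem.Int.mod d 2
    (r, 1 - r, d)
  else
    let mid := (lo + hi) / 2
    -- Python's 'i1, p1, s1 = rec(lo, mid)' tuple unpacking, as projections
    let r1 := pvRecB L lo mid
    let r2 := pvRecB L mid hi
    (r1.1 + r2.1, r1.2.1 + r2.2.1, r1.2.2 + r2.2.2)
termination_by hi - lo
decreasing_by all_goals omega

def CalculaParImparSomaDez_alt (dezenas : List Int) : Int × Int × Int :=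
  pvRecB dezenas 0 dezenas.length

-- ===== PRECONDITION & SPEC =====
def Spec_CalculaParImparSomaDez (dezenas : List Int) (out : Int × Int × Int) : Prop := out = CalculaParImparSomaDez_alt dezenas
instance (dezenas : List Int) (out : Int × Int × Int) : Decidable (Spec_CalculaParImparSomaDez dezenas out) := by unfold Spec_CalculaParImparSomaDez; infer_instance

-- ===== CLAIM (what is proved, stated in full; the proofs are below) =====
def Claim_equal_CalculaParImparSomaDez : Prop := ∀ (dezenas : List Int), Dom_CalculaParImparSomaDez dezenas → Spec_CalculaParImparSomaDez dezenas (CalculaParImparSomaDez dezenas)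

-- ===== LEMMAS AND PROOFS =====
-- Closed form both programs compute: (odd-indicator sum, length minus it, sum).
def pvG (xs : List Int) : Int × Int × Int :=
  ((xs.map (fun d => d % 2)).sum,
   (xs.length : Int) - (xs.map (fun d => d % 2)).sum,
   xs.sum)

-- Python %: for the positive divisor 2 it is Int.emod (PySem.Int.mod_eq_emod_of_pos).
theorem pvMod2 (d : Int) : PySem.Int.mod d 2 = d % 2 :=
  PySem.Int.mod_eq_emod_of_pos (by norm_num)

theorem pvG_append (xs ys : List Int) :
    pvG (xs ++ ys) = (((pvG xs).1 + (pvG ys).1,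
                       (pvG xs).2.1 + (pvG ys).2.1,
                       (pvG xs).2.2 + (pvG ys).2.2)) := by
  simp [pvG]
  ring

-- A's fold, from any accumulator, adds pvG's three components.
theorem pvFoldA (dezenas : List Int) (i p s : Int) :
    dezenas.foldl
      (fun acc d =>
        let (impares, pares, soma) := acc
        if PySem.Int.mod d 2 ≠ 0 then (impares + 1, pares, soma + d)
        else (impares, pares + 1, soma + d))
      (i, p, s)
    = (i + (pvG dezenas).1, p + (pvG dezenas).2.1, s + (pvG dezenas).2.2) := by
  induction dezenas generalizing i p s with
  | nil => simp [pvG]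
  | cons d tl ih =>
    rw [List.foldl_cons]
    dsimp only
    rcases PySem.Int.mod_two_eq d with h | h
    · rw [if_neg (by rw [h]; simp), ih]
      simp only [pvG, List.map_cons, List.sum_cons, List.length_cons, pvMod2 d ▸ h]
      refine Prod.ext ?_ (Prod.ext ?_ ?_) <;> dsimp only <;> push_cast <;> ring
    · rw [if_pos (by rw [h]; norm_num), ih]
      simp only [pvG, List.map_cons, List.sum_cons, List.length_cons, pvMod2 d ▸ h]
      refine Prod.ext ?_ (Prod.ext ?_ ?_) <;> dsimp only <;> push_cast <;> ring

-- B's divide-and-conquer computes pvG of the segment L[lo:hi].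
theorem pvRecB_eq_pvG (L : List Int) : ∀ (n lo hi : Nat), hi - lo = n → hi ≤ L.length →
    pvRecB L lo hi = pvG ((L.drop lo).take (hi - lo)) := by
  intro n
  induction n using Nat.strong_induction_on with
  | _ n ih =>
    intro lo hi hn hlen
    rw [pvRecB]
    by_cases h0 : hi - lo = 0
    · rw [dif_pos h0, h0]
      simp [pvG]
    · rw [dif_neg h0]
      by_cases h1 : hi - lo = 1
      · rw [dif_pos h1, h1]
        have hlo : lo < L.length := by omega
        have hdrop : L.drop lo = L[lo] :: L.drop (lo + 1) :=
          List.drop_eq_getElem_cons hlo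
        have htake : (L.drop lo).take 1 = [L[lo]] := by rw [hdrop, List.take_succ_cons, List.take_zero]
        have hget : PySem.List.pyGetD L (lo : Int) 0 = L[lo] := by
          simp [PySem.List.pyGetD_natCast, List.getD_eq_getElem?_getD,
                List.getElem?_eq_getElem hlo]
        rw [htake]
        simp only [pvG, List.map_cons, List.map_nil, List.sum_cons, List.sum_nil,
                   List.length_cons, List.length_nil, hget]
        refine Prod.ext ?_ (Prod.ext ?_ ?_) <;> dsimp only <;> simp
      · rw [dif_neg h1]
        have hm1 : (lo + hi) / 2 - lo < n := by omega
        have hm2 : hi - (lo + hi) / 2 < n := by omega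
        have hlomid : lo ≤ (lo + hi) / 2 := by omega
        have hmidhi : (lo + hi) / 2 ≤ hi := by omega
        dsimp only
        rw [ih _ hm1 lo _ rfl (by omega), ih _ hm2 _ hi rfl hlen]
        have hsplit : (L.drop lo).take (hi - lo)
            = (L.drop lo).take ((lo + hi) / 2 - lo)
              ++ (L.drop ((lo + hi) / 2)).take (hi - (lo + hi) / 2) := by
          have : hi - lo = ((lo + hi) / 2 - lo) + (hi - (lo + hi) / 2) := by omega
          rw [this, List.take_add, List.drop_drop]
          have h2 : lo + ((lo + hi) / 2 - lo) = (lo + hi) / 2 := by omega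
          rw [h2]
        rw [hsplit, pvG_append]

-- ===== VERDICT (by name: the statement is the Claim_ definition above) =====
theorem CalculaParImparSomaDez_spec : Claim_equal_CalculaParImparSomaDez := by
  intro dezenas _
  unfold Spec_CalculaParImparSomaDez CalculaParImparSomaDez CalculaParImparSomaDez_alt
  rw [pvFoldA, pvRecB_eq_pvG dezenas dezenas.length 0 dezenas.length rfl le_rfl]
  simp [pvG]
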